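-- pv_equiv track=rewrite | github.com/RevazRevazashvili/DataScraping | scraping/locksmiths/geocoding.py | simplify_address
-- ===== SOURCE A (Python) =====
-- def simplify_address(address):
--     if not isinstance(address, str):
--         return []
--     address_parts = address.split(',')
--     variations = []
--     for i in range(len(address_parts)):
--         simplified = ', '.join(address_parts[i:]).strip()
--         if simplified:
--             variations.append(simplified)
--     return variations
-- ===== SOURCE B (Python) =====
-- def simplify_address(address):
--     if not isinstance(address, str):
--         return []
--     parts = address.split(',')
--     out = []
--     acc = None
--     for part in reversed(parts):
--         acc = part if acc is None else part + ', ' + acc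
--         s = acc.strip()
--         if s:
--             out.append(s)
--     out.reverse()
--     return out
-- ===== Notes on version B (the rewrite author's own statement) =====
-- stated objective: alternative
-- what changed: B builds each comma-suffix string incrementally from the right with a single accumulator (part + ', ' + acc) and reverses the collected results, instead of re-joining a fresh slice for every start index.
import Mathlib
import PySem

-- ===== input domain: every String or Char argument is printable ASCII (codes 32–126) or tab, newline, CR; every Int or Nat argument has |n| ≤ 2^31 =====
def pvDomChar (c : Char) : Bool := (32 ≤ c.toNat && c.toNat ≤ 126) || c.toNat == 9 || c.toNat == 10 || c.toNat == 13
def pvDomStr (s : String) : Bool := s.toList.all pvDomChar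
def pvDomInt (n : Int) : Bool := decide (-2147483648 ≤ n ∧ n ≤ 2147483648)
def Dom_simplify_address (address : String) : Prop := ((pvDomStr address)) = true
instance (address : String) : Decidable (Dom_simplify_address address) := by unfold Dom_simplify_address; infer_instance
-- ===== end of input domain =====

-- B builds each suffix string incrementally from the right with one accumulator instead of
-- re-joining every slice; alternative decomposition, same asymptotic cost.

-- ===== PORT A =====
def simplify_address (address : String) : List String :=
  -- address.split(','): the separator is the non-empty literal ",", so split? is always `some`;
  -- `.getD []` only totalizes the match.
  let address_parts := (PySem.Str.split? address ",").getD []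
  (PySem.List.pyRange 0 (address_parts.length : Int) 1).foldl
    (fun variations i =>
      let simplified := PySem.Str.strip
        (PySem.Str.join ", " (PySem.List.slice address_parts (some i) none))
      if simplified ≠ "" then variations ++ [simplified] else variations) []

-- ===== PORT B =====
def simplify_address_alt (address : String) : List String :=
  let parts := (PySem.Str.split? address ",").getD []
  let st := parts.reverse.foldl
    (fun (st : Option String × List String) part =>
      let acc := match st.1 with
        | none => part
        | some a => part ++ ", " ++ a
      let s := PySem.Str.strip acc
      (some acc, if s ≠ "" then st.2 ++ [s] else st.2))
    (none, [])
  st.2.reverse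

-- ===== PRECONDITION & SPEC =====
def Spec_simplify_address (address : String) (out : List String) : Prop := out = simplify_address_alt address
instance (address : String) (out : List String) : Decidable (Spec_simplify_address address out) := by unfold Spec_simplify_address; infer_instance

-- ===== CLAIM (what is proved, stated in full; the proofs are below) =====
def Claim_equal_simplify_address : Prop := ∀ (address : String), Dom_simplify_address address → Spec_simplify_address address (simplify_address address)

-- ===== LEMMAS AND PROOFS =====

-- the suffix string A builds at index k
def pvSfx (parts : List String) (k : Nat) : String :=
  PySem.Str.strip (PySem.Str.join ", " (parts.drop k))

-- the common intermediate form: left-to-right list of non-empty stripped suffix joins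
def pvRes (parts : List String) : List String :=
  ((List.range parts.length).filter (fun k => pvSfx parts k ≠ "")).map (pvSfx parts)

-- B's fold step, named for the proofs
def pvStep (st : Option String × List String) (part : String) : Option String × List String :=
  let acc := match st.1 with
    | none => part
    | some a => part ++ ", " ++ a
  let s := PySem.Str.strip acc
  (some acc, if s ≠ "" then st.2 ++ [s] else st.2)

lemma pv_go_ne_nil (sep : List Char) : ∀ (fuel : Nat) (l cur : List Char) (acc : List (List Char)),
    PySem.Chars.splitOn.go sep fuel l cur acc ≠ [] := by
  intro fuel
  induction fuel with
  | zero => intro l cur acc; cases l <;> simp [PySem.Chars.splitOn.go]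
  | succ n ih =>
    intro l cur acc
    cases l with
    | nil => simp [PySem.Chars.splitOn.go]
    | cons c rest =>
      rw [PySem.Chars.splitOn.go]
      split_ifs <;> apply ih

lemma pv_splitOn_ne_nil (s sep : List Char) : PySem.Chars.splitOn s sep ≠ [] := by
  unfold PySem.Chars.splitOn
  exact pv_go_ne_nil sep _ s [] []

lemma pv_parts_ne_nil (address : String) :
    (PySem.Str.split? address ",").getD [] ≠ [] := by
  have hmap := PySem.Str.split?_map address ","
  have hc : PySem.Chars.split? address.toList ",".toList
      = some (PySem.Chars.splitOn address.toList ",".toList) := by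
    unfold PySem.Chars.split?
    rw [if_neg]
    rw [show (",".toList.isEmpty) = false by decide]
    simp
  rw [hc] at hmap
  cases hs : PySem.Str.split? address "," with
  | none => rw [hs] at hmap; simp at hmap
  | some l =>
    rw [hs] at hmap
    simp only [Option.map_some, Option.some.injEq] at hmap
    simp only [Option.getD_some]
    intro h
    rw [h] at hmap
    exact pv_splitOn_ne_nil address.toList ",".toList (by simpa using hmap.symm)

lemma pv_join_cons (p q : String) (rest : List String) :
    p ++ ", " ++ PySem.Str.join ", " (q :: rest) = PySem.Str.join ", " (p :: q :: rest) := by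
  apply String.toList_inj.mp
  simp only [String.toList_append, PySem.Str.toList_join, List.map_cons,
    PySem.Chars.join_cons_cons]

lemma pv_join_singleton (p : String) : PySem.Str.join ", " [p] = p := by
  apply String.toList_inj.mp
  simp [PySem.Str.toList_join, PySem.Chars.join_singleton]

lemma pvRes_cons (p : String) (rest : List String) :
    pvRes (p :: rest)
      = (if pvSfx (p :: rest) 0 ≠ "" then [pvSfx (p :: rest) 0] else []) ++ pvRes rest := by
  unfold pvRes
  have hf : pvSfx (p :: rest) ∘ Nat.succ = pvSfx rest := by
    funext k; simp [pvSfx]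
  have hq : ((fun k => !decide (pvSfx (p :: rest) k = "")) ∘ Nat.succ)
      = (fun k => !decide (pvSfx rest k = "")) := by
    funext k; simp [pvSfx]
  simp only [List.length_cons, List.range_succ_eq_map, List.filter_cons, List.filter_map]
  by_cases h : pvSfx (p :: rest) 0 ≠ "" <;> simp [h] <;> rw [hf, hq]

lemma pvRes_singleton (p : String) :
    pvRes [p] = if PySem.Str.strip p ≠ "" then [PySem.Str.strip p] else [] := by
  have h0 : pvSfx [p] 0 = PySem.Str.strip p := by
    simp [pvSfx, pv_join_singleton]
  unfold pvRes
  simp only [List.length_singleton, List.range_one, List.filter_cons, List.filter_nil, h0]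
  by_cases h : PySem.Str.strip p ≠ "" <;> simp [h, h0]

lemma pv_fold_eq (parts : List String) (h : parts ≠ []) :
    parts.reverse.foldl pvStep (none, [])
      = (some (PySem.Str.join ", " parts), (pvRes parts).reverse) := by
  induction parts with
  | nil => exact absurd rfl h
  | cons p rest ih =>
    cases rest with
    | nil =>
      show pvStep (none, []) p = _
      have hstep : pvStep (none, []) p
          = (some p, if PySem.Str.strip p ≠ "" then [PySem.Str.strip p] else []) := rfl
      rw [hstep, pv_join_singleton, pvRes_singleton]
      by_cases hc : PySem.Str.strip p ≠ "" <;> simp [hc]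
    | cons q rest' =>
      have hne : q :: rest' ≠ [] := by simp
      rw [List.reverse_cons, List.foldl_append, ih hne, List.foldl_cons, List.foldl_nil]
      have hstep : pvStep (some (PySem.Str.join ", " (q :: rest')), (pvRes (q :: rest')).reverse) p
          = (some (p ++ ", " ++ PySem.Str.join ", " (q :: rest')),
             if PySem.Str.strip (p ++ ", " ++ PySem.Str.join ", " (q :: rest')) ≠ ""
             then (pvRes (q :: rest')).reverse
                    ++ [PySem.Str.strip (p ++ ", " ++ PySem.Str.join ", " (q :: rest'))]
             else (pvRes (q :: rest')).reverse) := rfl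
      rw [hstep, pv_join_cons]
      conv_rhs => rw [pvRes_cons]
      have h0 : pvSfx (p :: q :: rest') 0 = PySem.Str.strip (PySem.Str.join ", " (p :: q :: rest')) := by
        simp [pvSfx]
      rw [h0]
      by_cases hc : PySem.Str.strip (PySem.Str.join ", " (p :: q :: rest')) ≠ "" <;>
        simp [hc]

lemma pv_A_eq (address : String) :
    simplify_address address = pvRes ((PySem.Str.split? address ",").getD []) := by
  unfold simplify_address
  show List.foldl
      (fun variations i =>
        let simplified := PySem.Str.strip
          (PySem.Str.join ", " (PySem.List.slice ((PySem.Str.split? address ",").getD []) (some i) none))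
        if simplified ≠ "" then variations ++ [simplified] else variations)
      [] (PySem.List.pyRange 0 ((((PySem.Str.split? address ",").getD []).length : Nat) : Int) 1)
    = pvRes ((PySem.Str.split? address ",").getD [])
  generalize (PySem.Str.split? address ",").getD [] = parts
  rw [PySem.List.pyRange_one]
  simp only [Int.sub_zero, Int.toNat_natCast]
  rw [List.foldl_map]
  rw [PySem.List.foldl_congr_mem (List.range parts.length) _
      (fun variations k =>
        if (fun k => decide (pvSfx parts k ≠ "")) k = true
        then variations ++ [pvSfx parts k] else variations)
      [] ?_]
  · rw [PySem.List.foldl_append_if (fun k => decide (pvSfx parts k ≠ "")) (pvSfx parts)]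
    simp [pvRes]
  · intro acc k _
    simp only [show (0 : Int) + (k : Int) = ((k : Nat) : Int) by omega,
      PySem.List.slice_from_natCast, pvSfx, decide_eq_true_eq]

lemma pv_B_eq (address : String) :
    simplify_address_alt address = pvRes ((PySem.Str.split? address ",").getD []) := by
  unfold simplify_address_alt
  show (List.foldl pvStep (none, []) ((PySem.Str.split? address ",").getD []).reverse).2.reverse
    = pvRes ((PySem.Str.split? address ",").getD [])
  rw [pv_fold_eq _ (pv_parts_ne_nil address)]
  simp

-- ===== VERDICT (by name: the statement is the Claim_ definition above) =====
theorem simplify_address_spec : Claim_equal_simplify_address := by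
  intro address _
  unfold Spec_simplify_address
  rw [pv_A_eq, pv_B_eq]
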